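-- pv_equiv track=rewrite | github.com/hersil94/Asignaci-n-de-salas-y-horarios | Hernan Silva - salas y horarios.py | asociarDemandaRamo
-- ===== SOURCE A (Python) =====
-- def asociarDemandaRamo(demanda):
--
--     frecuencias=[]
--     pares=[]
--     corregido=[]
--     i=0
--
--     #se cuenta cuantas veces se repite cada elemento de la demanda
--     #se agregan esos valores a la lista "frecuencias"
--     for ramo in demanda:
--         conteo=demanda.count(ramo)
--         frecuencias.append(conteo)
--
--
--
--
--     while i<len(demanda): #se itera desde 0 hasta el largo de la demanda
--         contador=frecuencias[i]#el valor de la posición i de la lista de frecuencias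
--         elementoY=str(contador)#ese mismo valor como string
--         par=demanda[i]+";"+elementoY # ramo i+ ";" +la frecuencia del ramo i
--         pares.append(par)   #se agrega ese par a una lista de pares
--         i=i+1
--
--
--     for par in pares: #se recorre la lista de pares
--         if par not in corregido: #se toma una vez cada par, sin repetir ningún valor
--             corregido.append(par) #y se agrega a la lista "corregido"
--
--     #para leer estos pares se puede aplicar .split a cada elemento
--     #de la lista creada por split lista[0] es el ramo
--     #lista[1] es la demanda de ese ramo
--
--     return corregido
-- ===== SOURCE B (Python) =====
-- def asociarDemandaRamo(demanda):
--     # dedup first (ordered list membership), then count each unique ramo once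
--     uniques = []
--     for ramo in demanda:
--         if ramo not in uniques:
--             uniques.append(ramo)
--     resultado = []
--     for ramo in uniques:
--         resultado.append(ramo + ";" + str(demanda.count(ramo)))
--     return resultado
-- ===== Notes on version B (the rewrite author's own statement) =====
-- stated objective: simpler
-- what changed: B dedups the ramos first and counts only each unique ramo once, instead of A's building a full-length frequency list, a full-length index-built pair list, and deduping the pairs afterwards.
import Mathlib
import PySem

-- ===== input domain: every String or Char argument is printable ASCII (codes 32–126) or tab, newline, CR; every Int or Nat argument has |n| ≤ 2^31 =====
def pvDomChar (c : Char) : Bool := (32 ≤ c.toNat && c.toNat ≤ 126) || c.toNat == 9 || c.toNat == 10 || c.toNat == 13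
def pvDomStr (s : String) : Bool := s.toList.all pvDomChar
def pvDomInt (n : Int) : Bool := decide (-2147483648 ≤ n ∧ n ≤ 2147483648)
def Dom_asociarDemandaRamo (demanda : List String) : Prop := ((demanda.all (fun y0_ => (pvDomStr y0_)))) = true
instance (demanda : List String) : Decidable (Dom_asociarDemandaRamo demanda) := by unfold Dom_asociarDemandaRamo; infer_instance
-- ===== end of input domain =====

-- B dedups the ramos first and counts each unique ramo once, instead of A's
-- full-length frequency list + index-built pair list + pair dedup (objective: simpler).

-- ===== PORT A =====
def asociarDemandaRamo (demanda : List String) : List String :=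
  -- frecuencias: for ramo in demanda: frecuencias.append(demanda.count(ramo))
  let frecuencias : List Int :=
    demanda.foldl (fun acc ramo => acc ++ [(PySem.List.count demanda ramo : Int)]) []
  -- while i < len(demanda): pares.append(demanda[i] + ";" + str(frecuencias[i]))
  -- (indices are always in range, so pyGetD's default is never read)
  let pares : List String :=
    (PySem.List.pyRange 0 (PySem.List.len demanda) 1).foldl
      (fun acc i =>
        let contador := PySem.List.pyGetD frecuencias i 0
        let elementoY := PySem.Int.toStr contador
        let par := (PySem.List.pyGetD demanda i "") ++ ";" ++ elementoY
        acc ++ [par]) []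
  -- for par in pares: if par not in corregido: corregido.append(par)
  pares.foldl (fun acc par => if par ∈ acc then acc else acc ++ [par]) []

-- ===== PORT B =====
def asociarDemandaRamo_alt (demanda : List String) : List String :=
  let uniques : List String :=
    demanda.foldl (fun acc ramo => if ramo ∈ acc then acc else acc ++ [ramo]) []
  uniques.foldl
    (fun acc ramo =>
      acc ++ [ramo ++ ";" ++ PySem.Int.toStr (PySem.List.count demanda ramo : Int)]) []

-- ===== PRECONDITION & SPEC =====
def Spec_asociarDemandaRamo (demanda : List String) (out : List String) : Prop := out = asociarDemandaRamo_alt demanda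
instance (demanda : List String) (out : List String) : Decidable (Spec_asociarDemandaRamo demanda out) := by unfold Spec_asociarDemandaRamo; infer_instance

-- ===== CLAIM (what is proved, stated in full; the proofs are below) =====
def Claim_equal_asociarDemandaRamo : Prop := ∀ (demanda : List String), Dom_asociarDemandaRamo demanda → Spec_asociarDemandaRamo demanda (asociarDemandaRamo demanda)

-- ===== LEMMAS AND PROOFS =====

-- str(n) never contains ';'
theorem digitChar_ne_semi (n : Nat) : Nat.digitChar n ≠ ';' := by
  rcases Nat.lt_or_ge n 16 with h | h
  · interval_cases n <;> decide
  · unfold Nat.digitChar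
    rw [if_neg (by omega : ¬ n = 0), if_neg (by omega : ¬ n = 1), if_neg (by omega : ¬ n = 2), if_neg (by omega : ¬ n = 3), if_neg (by omega : ¬ n = 4), if_neg (by omega : ¬ n = 5), if_neg (by omega : ¬ n = 6), if_neg (by omega : ¬ n = 7), if_neg (by omega : ¬ n = 8), if_neg (by omega : ¬ n = 9), if_neg (by omega : ¬ n = 10), if_neg (by omega : ¬ n = 11), if_neg (by omega : ¬ n = 12), if_neg (by omega : ¬ n = 13), if_neg (by omega : ¬ n = 14), if_neg (by omega : ¬ n = 15)]
    decide

theorem toDigitsCore_ne_semi :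
    ∀ (fuel n : Nat) (acc : List Char), (∀ c ∈ acc, c ≠ ';') →
      ∀ c ∈ Nat.toDigitsCore 10 fuel n acc, c ≠ ';' := by
  intro fuel
  induction fuel with
  | zero => intro n acc hacc c hc; exact hacc c hc
  | succ fuel ih =>
      intro n acc hacc c hc
      rw [Nat.toDigitsCore] at hc
      by_cases h : n / 10 = 0
      · simp [h] at hc
        rcases hc with h1 | h1
        · exact h1 ▸ digitChar_ne_semi _
        · exact hacc c h1
      · simp [h] at hc
        refine ih _ _ ?_ c hc
        intro d hd
        rcases List.mem_cons.mp hd with h1 | h1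
        · exact h1 ▸ digitChar_ne_semi _
        · exact hacc d h1

theorem semi_not_mem_toChars (n : Int) : ';' ∉ PySem.Int.toChars n := by
  unfold PySem.Int.toChars
  intro hmem
  split_ifs at hmem with h
  · rcases List.mem_cons.mp hmem with h1 | h1
    · exact absurd h1.symm (by decide)
    · exact toDigitsCore_ne_semi _ _ [] (by simp) ';' h1 rfl
  · exact toDigitsCore_ne_semi _ _ [] (by simp) ';' hmem rfl

-- the part before the last occurrence of a separator is determined
theorem first_sep {c : Char} :
    ∀ (p1 p2 s1 s2 : List Char), c ∉ p1 → c ∉ p2 →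
      p1 ++ c :: s1 = p2 ++ c :: s2 → p1 = p2 := by
  intro p1
  induction p1 with
  | nil =>
      intro p2 s1 s2 _ h2 heq
      cases p2 with
      | nil => rfl
      | cons x t =>
          simp only [List.nil_append, List.cons_append, List.cons.injEq] at heq
          exact absurd (heq.1 ▸ List.mem_cons_self) h2
  | cons x t ih =>
      intro p2 s1 s2 h1 h2 heq
      cases p2 with
      | nil =>
          simp only [List.cons_append, List.nil_append, List.cons.injEq] at heq
          exact absurd (heq.1.symm ▸ List.mem_cons_self) h1
      | cons y u =>
          simp only [List.cons_append, List.cons.injEq] at heq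
          have := ih u s1 s2 (fun h => h1 (List.mem_cons_of_mem _ h))
            (fun h => h2 (List.mem_cons_of_mem _ h)) heq.2
          rw [heq.1, this]

-- r ↦ r + ";" + str(m r) is injective (the count part contains no ';')
theorem sep_inj (m : String → Int) :
    Function.Injective (fun r : String => r ++ ";" ++ PySem.Int.toStr (m r)) := by
  intro x y hxy
  simp only at hxy
  have hl : x.toList ++ ';' :: (PySem.Int.toStr (m x)).toList
          = y.toList ++ ';' :: (PySem.Int.toStr (m y)).toList := by
    have := congrArg String.toList hxy
    simpa [String.toList_append] using this
  have hrev : (PySem.Int.toStr (m x)).toList.reverse ++ ';' :: x.toList.reverse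
            = (PySem.Int.toStr (m y)).toList.reverse ++ ';' :: y.toList.reverse := by
    have := congrArg List.reverse hl
    simpa [List.reverse_append] using this
  have hnx : ';' ∉ (PySem.Int.toStr (m x)).toList.reverse := by
    simp [PySem.Int.toList_toStr, semi_not_mem_toChars]
  have hny : ';' ∉ (PySem.Int.toStr (m y)).toList.reverse := by
    simp [PySem.Int.toList_toStr, semi_not_mem_toChars]
  have hpre := first_sep _ _ _ _ hnx hny hrev
  rw [hpre] at hrev
  have htails := List.append_cancel_left hrev
  have : x.toList.reverse = y.toList.reverse := by
    simpa using htails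
  have hxl : x.toList = y.toList := by
    have := congrArg List.reverse this
    simpa using this
  exact String.ext (by simpa [String.toList] using hxl)

-- ordered dedup commutes with mapping an injective function
theorem dedup_map_comm (f : String → String) (hf : Function.Injective f) :
    ∀ (l acc : List String),
      (l.map f).foldl (fun m p => if p ∈ m then m else m ++ [p]) (acc.map f)
        = (l.foldl (fun m x => if x ∈ m then m else m ++ [x]) acc).map f := by
  intro l
  induction l with
  | nil => intro acc; simp
  | cons x t ih =>
      intro acc
      simp only [List.map_cons, List.foldl_cons]
      have hmem : (f x ∈ acc.map f) = (x ∈ acc) := by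
        simp only [eq_iff_iff]
        exact List.mem_map_of_injective hf
      by_cases hx : x ∈ acc
      · rw [if_pos (hmem ▸ hx), if_pos hx]; exact ih acc
      · rw [if_neg (by rw [hmem]; exact hx), if_neg hx]
        have : acc.map f ++ [f x] = (acc ++ [x]).map f := by simp
        rw [this]; exact ih (acc ++ [x])

-- A's pares list is demanda mapped through r ↦ r + ";" + str(count r)
theorem pares_eq (demanda : List String) :
    (PySem.List.pyRange 0 (PySem.List.len demanda) 1).foldl
      (fun acc i =>
        acc ++ [(PySem.List.pyGetD demanda i "") ++ ";" ++
          PySem.Int.toStr (PySem.List.pyGetD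
            (demanda.foldl (fun a r => a ++ [(PySem.List.count demanda r : Int)]) []) i 0)]) []
      = demanda.map (fun r => r ++ ";" ++ PySem.Int.toStr (PySem.List.count demanda r : Int)) := by
  have hfrec : demanda.foldl (fun a r => a ++ [(PySem.List.count demanda r : Int)]) []
      = demanda.map (fun r => (PySem.List.count demanda r : Int)) := by
    simpa using PySem.List.foldl_append_singleton_eq_map
      (fun r => (PySem.List.count demanda r : Int)) demanda []
  rw [hfrec]
  rw [PySem.List.foldl_congr_mem _
    _ (fun acc i => acc ++ [(PySem.List.pyGetD demanda i "") ++ ";" ++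
        PySem.Int.toStr (PySem.List.count demanda (PySem.List.pyGetD demanda i "") : Int)]) _
    ?_]
  · rw [PySem.List.foldl_pyRange_zero_pyGetD demanda ""
      (fun acc r => acc ++ [r ++ ";" ++ PySem.Int.toStr (PySem.List.count demanda r : Int)]) []]
    simpa using PySem.List.foldl_append_singleton_eq_map
      (fun r => r ++ ";" ++ PySem.Int.toStr (PySem.List.count demanda r : Int)) demanda []
  · intro acc i hi
    rcases PySem.List.mem_pyRange_one.mp hi with ⟨h0, h1⟩
    have hlen : i < (demanda.length : Int) := by simpa [PySem.List.len] using h1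
    have hlenm : i < ((demanda.map (fun r => (PySem.List.count demanda r : Int))).length : Int) := by
      simpa using hlen
    have e1 : PySem.List.pyGetD demanda i "" = demanda[i.toNat] :=
      PySem.List.pyGetD_eq_getElem _ _ h0 hlen
    have e2 : PySem.List.pyGetD (demanda.map (fun r => (PySem.List.count demanda r : Int))) i 0
        = (demanda.map (fun r => (PySem.List.count demanda r : Int)))[i.toNat] :=
      PySem.List.pyGetD_eq_getElem _ _ h0 hlenm
    simp only [e1, e2]
    simp

-- ===== VERDICT (by name: the statement is the Claim_ definition above) =====
theorem asociarDemandaRamo_spec : Claim_equal_asociarDemandaRamo := by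
  unfold Claim_equal_asociarDemandaRamo
  intro demanda _
  unfold Spec_asociarDemandaRamo asociarDemandaRamo asociarDemandaRamo_alt
  simp only []
  rw [pares_eq demanda]
  have hB : (demanda.foldl (fun m x => if x ∈ m then m else m ++ [x]) []).foldl
      (fun acc ramo =>
        acc ++ [ramo ++ ";" ++ PySem.Int.toStr (PySem.List.count demanda ramo : Int)]) []
      = ((demanda.foldl (fun m x => if x ∈ m then m else m ++ [x]) []).map
          (fun r => r ++ ";" ++ PySem.Int.toStr (PySem.List.count demanda r : Int))) := by
    simpa using PySem.List.foldl_append_singleton_eq_map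
      (fun r => r ++ ";" ++ PySem.Int.toStr (PySem.List.count demanda r : Int)) _ ([] : List String)
  rw [hB]
  have := dedup_map_comm
    (fun r => r ++ ";" ++ PySem.Int.toStr (PySem.List.count demanda r : Int))
    (sep_inj (fun r => (PySem.List.count demanda r : Int))) demanda []
  simpa using this
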